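-- pv_equiv track=rewrite | github.com/kagu/kunquat | kunquat/tracker/ui/model/typewritermanager.py | _octaves_to_rows
-- ===== SOURCE A (Python) =====
-- import itertools
--
-- def _octaves_to_rows(octaves):
--     notes = list(itertools.chain(*octaves))
--     upper = []
--     lower = []
--     for (i, note) in enumerate(notes):
--         if i % 2 == 0:
--             lower.append(note)
--         else:
--             upper.append(note)
--     rows = [upper, lower]
--     return rows
-- ===== SOURCE B (Python) =====
-- import itertools
--
-- def _octaves_to_rows(octaves):
--     notes = list(itertools.chain.from_iterable(octaves))
--     return [notes[1::2], notes[0::2]]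
-- ===== Notes on version B (the rewrite author's own statement) =====
-- stated objective: idiomatic
-- what changed: Replaces the enumerate/parity-branch accumulator loop with flatten followed by two stride slices notes[1::2] and notes[0::2].
import Mathlib
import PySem

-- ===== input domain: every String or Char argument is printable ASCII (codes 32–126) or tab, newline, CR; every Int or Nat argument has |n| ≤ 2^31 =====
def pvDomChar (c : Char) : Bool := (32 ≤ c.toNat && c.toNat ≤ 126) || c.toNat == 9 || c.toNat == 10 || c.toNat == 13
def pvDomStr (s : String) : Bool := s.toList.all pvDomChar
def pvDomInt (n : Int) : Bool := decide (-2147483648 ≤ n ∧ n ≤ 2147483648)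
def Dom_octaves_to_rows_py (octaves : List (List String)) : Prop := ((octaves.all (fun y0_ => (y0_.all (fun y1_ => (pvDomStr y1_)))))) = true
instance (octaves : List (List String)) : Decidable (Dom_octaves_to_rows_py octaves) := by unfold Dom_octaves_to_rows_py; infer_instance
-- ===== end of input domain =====

-- B flattens the octaves and builds the two rows with stride slices notes[1::2] / notes[0::2]
-- instead of A's enumerate loop with a parity branch; same cost, more idiomatic.

-- ===== PORT A =====
def octaves_to_rows_py (octaves : List (List String)) : List (List String) :=
  let notes := octaves.flatten            -- list(itertools.chain(*octaves))
  let ul := (PySem.List.enumerate notes).foldl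
      (fun (acc : List String × List String) (p : Int × String) =>
        if PySem.Int.mod p.1 2 == 0 then (acc.1, acc.2 ++ [p.2])
        else (acc.1 ++ [p.2], acc.2))
      ([], [])
  [ul.1, ul.2]

-- ===== PORT B =====
def octaves_to_rows_py_alt (octaves : List (List String)) : List (List String) :=
  let notes := octaves.flatten            -- list(itertools.chain.from_iterable(octaves))
  -- notes[1::2] and notes[0::2]; step 2 ≠ 0, so slice? always returns some — getD [] only unwraps
  [(PySem.List.slice? notes (some 1) none 2).getD [],
   (PySem.List.slice? notes none none 2).getD []]

-- ===== PRECONDITION & SPEC =====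
def Spec_octaves_to_rows_py (octaves : List (List String)) (out : List (List String)) : Prop := out = octaves_to_rows_py_alt octaves
instance (octaves : List (List String)) (out : List (List String)) : Decidable (Spec_octaves_to_rows_py octaves out) := by unfold Spec_octaves_to_rows_py; infer_instance

-- ===== CLAIM (what is proved, stated in full; the proofs are below) =====
def Claim_equal_octaves_to_rows_py : Prop := ∀ (octaves : List (List String)), Dom_octaves_to_rows_py octaves → Spec_octaves_to_rows_py octaves (octaves_to_rows_py octaves)

-- ===== LEMMAS AND PROOFS =====

mutual
/-- the elements of `xs` at even positions -/
def pvEvens {α : Type} : List α → List α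
  | [] => []
  | a :: t => a :: pvOdds t
/-- the elements of `xs` at odd positions -/
def pvOdds {α : Type} : List α → List α
  | [] => []
  | _ :: t => pvEvens t
end

theorem pvEvens_cons2 {α : Type} (a b : α) (t : List α) :
    pvEvens (a :: b :: t) = a :: pvEvens t := by
  simp [pvEvens, pvOdds]

theorem fmod_two (i : Int) : i.fmod 2 = i % 2 := by
  rw [Int.fmod_eq_emod]; simp

/-- A's loop, characterised: starting at index `i` with accumulators `u, l`. -/
theorem loopA {α : Type} (notes : List α) : ∀ (i : Int) (u l : List α),
    (PySem.List.enumerate notes i).foldl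
      (fun (acc : List α × List α) (p : Int × α) =>
        if p.1 % 2 == 0 then (acc.1, acc.2 ++ [p.2])
        else (acc.1 ++ [p.2], acc.2)) (u, l)
    = if i % 2 = 0 then (u ++ pvOdds notes, l ++ pvEvens notes)
      else (u ++ pvEvens notes, l ++ pvOdds notes) := by
  induction notes with
  | nil => intro i u l; simp [PySem.List.enumerate, pvEvens, pvOdds]
  | cons a t ih =>
    intro i u l
    simp only [PySem.List.enumerate, List.foldl_cons]
    by_cases h : i % 2 = 0
    · have h1 : ¬ (i + 1) % 2 = 0 := by omega
      rw [if_pos (by simp [h]), ih (i+1) u (l ++ [a])]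
      simp [h, h1, pvEvens, pvOdds]
    · have h1 : (i + 1) % 2 = 0 := by omega
      rw [if_neg (by simp [h]), ih (i+1) (u ++ [a]) l]
      simp [h, h1, pvEvens, pvOdds]

theorem stride2_aux {α : Type} (n : Nat) : ∀ xs : List α, xs.length ≤ n →
    (List.range ((xs.length + 1) / 2)).filterMap (fun k => xs[2 * k]?) = pvEvens xs := by
  induction n with
  | zero =>
    intro xs h
    have : xs = [] := List.eq_nil_of_length_eq_zero (by omega)
    subst this; simp [pvEvens]
  | succ n ih =>
    intro xs h
    match xs with
    | [] => simp [pvEvens]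
    | [a] => simp [pvEvens, pvOdds, List.range_succ]
    | a :: b :: t =>
      have hlen : ((a :: b :: t).length + 1) / 2 = (t.length + 1) / 2 + 1 := by
        simp; omega
      rw [hlen, List.range_succ_eq_map, List.filterMap_cons, pvEvens_cons2]
      simp only [List.filterMap_map]
      have hfun : ∀ k ∈ (List.range ((t.length + 1) / 2)),
          ((fun k => (a :: b :: t)[2 * k]?) ∘ (fun i => i + 1)) k = (fun k => t[2 * k]?) k := by
        intro k _
        have h2 : 2 * (k + 1) = 2 * k + 1 + 1 := by omega
        simp [Function.comp, h2]
      rw [List.filterMap_congr hfun, ih t (by simp at h; omega)]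
      simp

theorem stride2 {α : Type} (xs : List α) :
    (List.range ((xs.length + 1) / 2)).filterMap (fun k => xs[2 * k]?) = pvEvens xs :=
  stride2_aux xs.length xs le_rfl

/-- notes[0::2] is the even-position elements. -/
theorem slice_even {α : Type} (xs : List α) :
    PySem.List.slice? xs none none 2 = some (pvEvens xs) := by
  simp only [PySem.List.slice?, PySem.List.sliceIndices]
  norm_num
  have hc : (if 0 < xs.length then (((xs.length : Int) + 2 - 1) / 2).toNat else 0)
      = (xs.length + 1) / 2 := by split <;> omega
  rw [hc, ← stride2 xs]
  apply List.filterMap_congr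
  intro k _
  have : ((2 : Int) * (k : Int)).toNat = 2 * k := by omega
  simp [this]

/-- notes[1::2] is the odd-position elements. -/
theorem slice_odd {α : Type} (xs : List α) :
    PySem.List.slice? xs (some 1) none 2 = some (pvOdds xs) := by
  rcases xs with _ | ⟨a, t⟩
  · simp [PySem.List.slice?, PySem.List.sliceIndices, pvOdds]
  · simp only [PySem.List.slice?, PySem.List.sliceIndices]
    norm_num
    have hc : (if 0 < t.length then (((t.length : Int) + 2 - 1) / 2).toNat else 0)
        = (t.length + 1) / 2 := by split <;> omega
    rw [show pvOdds (a :: t) = pvEvens t from rfl, hc, ← stride2 t]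
    apply List.filterMap_congr
    intro k _
    have h2 : ((1 : Int) + 2 * (k : Int)).toNat = 2 * k + 1 := by omega
    simp [h2]

-- ===== VERDICT (by name: the statement is the Claim_ definition above) =====
theorem octaves_to_rows_py_spec : Claim_equal_octaves_to_rows_py := by
  intro octaves _
  unfold Spec_octaves_to_rows_py octaves_to_rows_py octaves_to_rows_py_alt
  dsimp only
  simp only [PySem.Int.mod, fmod_two]
  rw [loopA octaves.flatten 0 [] [], slice_even, slice_odd]
  simp
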